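-- pv_equiv track=rewrite | github.com/viszi/codes | CodeWars/5kyu/Python/009-product-of-consecutive-fib-numbers.py | productFib
-- ===== SOURCE A (Python) =====
-- def fibonacci(n, cache={}):
--     if n in cache:
--         return cache[n]
--     if n == 0:
--         return 0
--     if n == 1:
--         return 1
--
--     cache[n] = fibonacci(n - 1, cache) + fibonacci(n - 2, cache)
--     return cache[n]
--
-- def productFib(prod):
--     i = 1
--
--     while True:
--         num1 = fibonacci(i-1)
--         num2 = fibonacci(i)
--
--         if num1 * num2 == prod:
--             return [num1, num2, True]
--
--         if num1 * num2 < prod: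
--             i += 1
--
--         if num1 * num2 > prod:
--             return [num1, num2, False]
-- ===== SOURCE B (Python) =====
-- def productFib(prod):
--     a, b = 0, 1
--     while a * b < prod:
--         a, b = b, a + b
--     return [a, b, a * b == prod]
-- ===== Notes on version B (the rewrite author's own statement) =====
-- stated objective: simpler
-- what changed: Replaces the memoized recursive fibonacci helper and index-driven while-True loop with two running Fibonacci values advanced in place and a single loop condition; no recursion, no index, no cache.
import Mathlib
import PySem

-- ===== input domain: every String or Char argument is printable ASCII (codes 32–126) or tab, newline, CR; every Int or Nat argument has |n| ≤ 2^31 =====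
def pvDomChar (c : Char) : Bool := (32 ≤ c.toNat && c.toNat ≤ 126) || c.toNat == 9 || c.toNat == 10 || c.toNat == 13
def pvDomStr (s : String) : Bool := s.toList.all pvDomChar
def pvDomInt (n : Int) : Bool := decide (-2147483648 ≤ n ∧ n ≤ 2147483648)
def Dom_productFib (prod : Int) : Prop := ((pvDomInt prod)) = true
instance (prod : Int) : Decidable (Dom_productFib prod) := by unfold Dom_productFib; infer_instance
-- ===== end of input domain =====

-- B replaces the memoized recursive fibonacci helper and index-driven while-True loop
-- with two running Fibonacci values advanced in place (objective: simpler).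


-- ===== PORT A =====
-- fibonacci(n): the cache is pure memoization, so the port is the plain recursion.
def fibA : Nat → Int
  | 0 => 0
  | 1 => 1
  | n + 2 => fibA (n + 1) + fibA n

-- the while-True loop over the index i (fuel makes it total; 100 steps cover |prod| ≤ 2^31)
def loopA (prod : Int) (i : Nat) : Nat → Int × Int × Bool
  | 0 => (0, 0, false)   -- fuel exhausted (unreachable for |prod| ≤ 2^31 with fuel 100)
  | fuel + 1 =>
    let num1 := fibA (i - 1)
    let num2 := fibA i
    if num1 * num2 == prod then (num1, num2, true)
    else if num1 * num2 > prod then (num1, num2, false)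
    else loopA prod (i + 1) fuel

def productFib (prod : Int) : Int × Int × Bool := loopA prod 1 100

-- ===== PORT B =====
def loopB (prod : Int) (a b : Int) : Nat → Int × Int × Bool
  | 0 => (0, 0, false)   -- fuel exhausted (unreachable for |prod| ≤ 2^31 with fuel 100)
  | fuel + 1 =>
    if a * b < prod then loopB prod b (a + b) fuel
    else (a, b, a * b == prod)

def productFib_alt (prod : Int) : Int × Int × Bool := loopB prod 0 1 100

-- ===== PRECONDITION & SPEC =====
def Spec_productFib (prod : Int) (out : Int × Int × Bool) : Prop := out = productFib_alt prod
instance (prod : Int) (out : Int × Int × Bool) : Decidable (Spec_productFib prod out) := by unfold Spec_productFib; infer_instance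

-- ===== CLAIM (what is proved, stated in full; the proofs are below) =====
def Claim_equal_productFib : Prop := ∀ (prod : Int), Dom_productFib prod → Spec_productFib prod (productFib prod)

-- ===== LEMMAS AND PROOFS =====

theorem loopA_eq_loopB (prod : Int) (fuel : Nat) :
    ∀ i : Nat, 1 ≤ i → loopA prod i fuel = loopB prod (fibA (i - 1)) (fibA i) fuel := by
  induction fuel with
  | zero => intro i _; rfl
  | succ n ih =>
    intro i hi
    simp only [loopA, loopB]
    by_cases he : fibA (i - 1) * fibA i = prod
    · simp [he]
    · by_cases hg : fibA (i - 1) * fibA i > prod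
      · have : ¬ fibA (i - 1) * fibA i < prod := by omega
        simp [he, hg, this]
      · have hlt : fibA (i - 1) * fibA i < prod := by omega
        simp only [he, hg, hlt, beq_iff_eq, if_false, if_true]
        have hrec : fibA (i + 1 - 1) = fibA i := by simp
        have hnext : fibA (i + 1) = fibA (i - 1) + fibA i := by
          obtain ⟨j, rfl⟩ : ∃ j, i = j + 1 := ⟨i - 1, by omega⟩
          show fibA (j + 2) = _
          simp [fibA, Int.add_comm]
        rw [ih (i + 1) (by omega), hrec, hnext]

theorem productFib_spec : Claim_equal_productFib := by
  intro prod _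
  show productFib prod = productFib_alt prod
  unfold productFib productFib_alt
  simpa [fibA] using loopA_eq_loopB prod 100 1 (by omega)
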